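-- pv_equiv track=rewrite | github.com/emilpaulitz/modeling_resources | metabolic_modelling/cobrapy_convenience.py | formulae_equal
-- ===== SOURCE A (Python) =====
-- def formulae_equal(f1, f2, H_err = 1):
--     if f1 == f2:
--         return True
--
--     # H are in the error bounds
--     if abs((f1['H'] if 'H' in f1 else 0) - (f2['H'] if 'H' in f2 else 0)) <= H_err:
--
--         for k1, v1 in f1.items():
--             if k1 != 'H' and (k1 not in f2 or f2[k1] != v1):
--                 return False
--
--         for k2, v2 in f2.items():
--             if k2 != 'H' and k2 not in f1:
--                 return False
--
--         return True
--     return False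
-- ===== SOURCE B (Python) =====
-- def formulae_equal(f1, f2, H_err=1):
--     if f1 == f2:
--         return True
--     # canonicalize: sort the H-stripped item lists by key and compare
--     s1 = sorted(((k, v) for k, v in f1.items() if k != 'H'), key=lambda p: p[0])
--     s2 = sorted(((k, v) for k, v in f2.items() if k != 'H'), key=lambda p: p[0])
--     return s1 == s2 and abs(f1.get('H', 0) - f2.get('H', 0)) <= H_err
-- ===== Notes on version B (the rewrite author's own statement) =====
-- stated objective: alternative
-- what changed: Replaces A's two directional key-scan loops over both dicts with canonicalization: sort each H-stripped item list by key and compare the sorted lists once, keeping A's exact-equality shortcut so negative H_err behaves identically.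
import Mathlib
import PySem

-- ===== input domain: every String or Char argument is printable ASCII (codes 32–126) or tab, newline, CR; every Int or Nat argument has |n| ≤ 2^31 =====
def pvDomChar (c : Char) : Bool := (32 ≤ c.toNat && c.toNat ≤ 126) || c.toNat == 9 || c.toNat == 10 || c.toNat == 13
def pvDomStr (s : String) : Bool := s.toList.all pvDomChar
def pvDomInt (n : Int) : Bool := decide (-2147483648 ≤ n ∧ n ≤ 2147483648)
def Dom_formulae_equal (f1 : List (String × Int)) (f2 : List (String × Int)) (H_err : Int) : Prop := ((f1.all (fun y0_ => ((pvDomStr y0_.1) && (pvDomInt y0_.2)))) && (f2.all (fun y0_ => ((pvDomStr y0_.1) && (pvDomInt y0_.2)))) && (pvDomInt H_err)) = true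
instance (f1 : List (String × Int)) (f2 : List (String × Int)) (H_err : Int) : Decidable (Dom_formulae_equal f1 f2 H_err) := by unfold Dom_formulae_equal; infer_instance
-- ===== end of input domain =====

-- B canonicalizes both formulae: it sorts the H-stripped item lists by key and
-- compares the sorted lists, instead of A's two directional key-scan loops
-- (objective: alternative).

-- Shared model of Python primitives on dict-as-assoc-list arguments:
-- d[k] / 'k in d' via first-match lookup, and Python's order-insensitive dict '=='.
def pvLookup (xs : List (String × Int)) (k : String) : Option Int :=
  (xs.find? (fun p => p.1 == k)).map (·.2)

def pvDictEq (a b : List (String × Int)) : Bool :=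
  (a.all (fun p => pvLookup b p.1 == pvLookup a p.1)) &&
  (b.all (fun p => (pvLookup a p.1).isSome))

-- ===== PORT A =====
def formulae_equal (f1 : List (String × Int)) (f2 : List (String × Int)) (H_err : Int) : Bool :=
  if pvDictEq f1 f2 then true
  else if decide (|(pvLookup f1 "H").getD 0 - (pvLookup f2 "H").getD 0| ≤ H_err) then
    -- first loop: early 'return False' ⇒ all
    if f1.all (fun p => p.1 == "H" || pvLookup f2 p.1 == some p.2) then
      -- second loop
      if f2.all (fun p => p.1 == "H" || (pvLookup f1 p.1).isSome) then true
      else false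
    else false
  else false

-- ===== PORT B =====
def formulae_equal_alt (f1 : List (String × Int)) (f2 : List (String × Int)) (H_err : Int) : Bool :=
  if pvDictEq f1 f2 then true
  else
    let s1 := PySem.List.sorted (f1.filter (fun p => !(p.1 == "H"))) (fun p => p.1) false
    let s2 := PySem.List.sorted (f2.filter (fun p => !(p.1 == "H"))) (fun p => p.1) false
    s1 == s2 && decide (|(pvLookup f1 "H").getD 0 - (pvLookup f2 "H").getD 0| ≤ H_err)

-- ===== PRECONDITION & SPEC =====
-- Pre_ only states dict well-formedness (pairwise-distinct keys), which is
-- implicit in the Python arguments being dicts; it excludes no Python input.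
def Pre_formulae_equal (f1 : List (String × Int)) (f2 : List (String × Int)) (H_err : Int) : Prop :=
  (f1.map (·.1)).Nodup ∧ (f2.map (·.1)).Nodup
instance (f1 : List (String × Int)) (f2 : List (String × Int)) (H_err : Int) : Decidable (Pre_formulae_equal f1 f2 H_err) := by unfold Pre_formulae_equal; infer_instance

def pvWitness_formulae_equal : (List (String × Int)) × (List (String × Int)) × Int :=
  ([("C", 2), ("H", 3)], [("C", 2), ("H", 4)], 1)

def Spec_formulae_equal (f1 : List (String × Int)) (f2 : List (String × Int)) (H_err : Int) (out : Bool) : Prop := out = formulae_equal_alt f1 f2 H_err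
instance (f1 : List (String × Int)) (f2 : List (String × Int)) (H_err : Int) (out : Bool) : Decidable (Spec_formulae_equal f1 f2 H_err out) := by unfold Spec_formulae_equal; infer_instance

-- ===== CLAIM (what is proved, stated in full; the proofs are below) =====
def Claim_equal_formulae_equal : Prop := ∀ (f1 : List (String × Int)) (f2 : List (String × Int)) (H_err : Int), Dom_formulae_equal f1 f2 H_err → Pre_formulae_equal f1 f2 H_err → Spec_formulae_equal f1 f2 H_err (formulae_equal f1 f2 H_err)

-- ===== LEMMAS AND PROOFS =====

-- lookup ignores H-stripping for non-H keys
theorem pvLookup_filter (xs : List (String × Int)) (k : String) (hk : k ≠ "H") :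
    pvLookup (xs.filter (fun p => !(p.1 == "H"))) k = pvLookup xs k := by
  induction xs with
  | nil => rfl
  | cons p rest ih =>
    unfold pvLookup at ih ⊢
    by_cases hH : p.1 = "H"
    · have h2 : ((p.1 == k)) = false := by
        simp only [beq_eq_false_iff_ne, ne_eq, hH]
        exact fun h => hk h.symm
      rw [List.filter_cons_of_neg (by simp [hH])]
      simp only [List.find?_cons, h2]
      exact ih
    · rw [List.filter_cons_of_pos (by simp [hH])]
      cases hpk : ((p.1 == k)) with
      | true => simp only [List.find?_cons, hpk]
      | false =>
        simp only [List.find?_cons, hpk]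
        exact ih

-- in a well-formed dict, each item's key looks up that item's value
theorem pvLookup_mem {xs : List (String × Int)} (h : (xs.map (·.1)).Nodup)
    {p : String × Int} (hp : p ∈ xs) : pvLookup xs p.1 = some p.2 := by
  induction xs with
  | nil => cases hp
  | cons q rest ih =>
    rw [List.map_cons, List.nodup_cons] at h
    unfold pvLookup
    rcases List.mem_cons.mp hp with rfl | hp'
    · simp only [List.find?_cons, beq_self_eq_true]
      rfl
    · have hne : ((q.1 == p.1)) = false := by
        simp only [beq_eq_false_iff_ne, ne_eq]
        intro he
        exact h.1 (by rw [he]; exact List.mem_map_of_mem hp')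
      simp only [List.find?_cons, hne]
      exact ih h.2 hp'

-- a successful lookup exhibits a member
theorem mem_of_pvLookup {xs : List (String × Int)} {k : String} {v : Int}
    (h : pvLookup xs k = some v) : (k, v) ∈ xs := by
  unfold pvLookup at h
  cases hf : xs.find? (fun p => p.1 == k) with
  | none => rw [hf] at h; cases h
  | some p =>
    rw [hf] at h
    have hm := List.mem_of_find?_eq_some hf
    have hk : p.1 = k := by
      have := List.find?_some hf
      simpa using this
    have hv : p.2 = v := by simpa using h
    have : (k, v) = p := by cases p; simp_all
    rw [this]; exact hm

-- key-Nodup passes to the H-stripped list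
theorem nodup_keys_filter {xs : List (String × Int)} (h : (xs.map (·.1)).Nodup) :
    ((xs.filter (fun p => !(p.1 == "H"))).map (·.1)).Nodup :=
  h.sublist ((List.filter_sublist (l := xs)).map (·.1))

-- Python dict equality of well-formed dicts is permutation of the item lists
theorem dictEq_iff_perm {d1 d2 : List (String × Int)}
    (hn1 : (d1.map (·.1)).Nodup) (hn2 : (d2.map (·.1)).Nodup) :
    pvDictEq d1 d2 = true ↔ d1.Perm d2 := by
  have hnd1 : d1.Nodup := hn1.of_map
  have hnd2 : d2.Nodup := hn2.of_map
  unfold pvDictEq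
  simp only [Bool.and_eq_true, List.all_eq_true]
  constructor
  · rintro ⟨h1, h2⟩
    rw [List.perm_ext_iff_of_nodup hnd1 hnd2]
    intro p
    constructor
    · intro hp
      have := h1 p hp
      rw [pvLookup_mem hn1 hp] at this
      have : pvLookup d2 p.1 = some p.2 := by simpa using this
      exact mem_of_pvLookup this
    · intro hp
      have hs := h2 p hp
      cases hl : pvLookup d1 p.1 with
      | none => rw [hl] at hs; cases hs
      | some v =>
        have hv1 : (p.1, v) ∈ d1 := mem_of_pvLookup hl
        have := h1 (p.1, v) hv1
        rw [hl] at this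
        have hd2 : pvLookup d2 p.1 = some v := by simpa using this
        rw [pvLookup_mem hn2 hp] at hd2
        have : v = p.2 := by simpa using hd2.symm
        subst this
        simpa using hv1
  · intro hperm
    constructor
    · intro p hp
      rw [pvLookup_mem hn1 hp, pvLookup_mem hn2 (hperm.mem_iff.mp hp)]
      simp
    · intro p hp
      rw [pvLookup_mem hn1 (hperm.mem_iff.mpr hp)]
      simp

-- equality of the key-sorted lists is permutation (keys Nodup ⇒ strictly increasing sort)
theorem sortedEq_iff_perm {d1 d2 : List (String × Int)}
    (hn1 : (d1.map (·.1)).Nodup) (hn2 : (d2.map (·.1)).Nodup) :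
    (PySem.List.sorted d1 (fun p => p.1) false = PySem.List.sorted d2 (fun p => p.1) false)
    ↔ d1.Perm d2 := by
  constructor
  · intro h
    exact ((PySem.List.sorted_perm d1 (fun p => p.1) false).symm.trans
      (h ▸ PySem.List.sorted_perm d2 (fun p => p.1) false))
  · intro hperm
    have hp1 : (PySem.List.sorted d1 (fun p => p.1) false).Perm d2 :=
      (PySem.List.sorted_perm d1 (fun p => p.1) false).trans hperm
    have hle : (PySem.List.sorted d1 (fun p => p.1) false).Pairwise
        (fun a b => a.1 ≤ b.1) := PySem.List.sorted_pairwise d1 (fun p => p.1)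
    have hkeys : ((PySem.List.sorted d1 (fun p => p.1) false).map (·.1)).Nodup := by
      have := (PySem.List.sorted_perm d1 (fun p => p.1) false).map (·.1)
      exact this.nodup_iff.mpr hn1
    have hne : (PySem.List.sorted d1 (fun p => p.1) false).Pairwise
        (fun a b => a.1 ≠ b.1) := (List.pairwise_map.mp hkeys)
    have hlt : (PySem.List.sorted d1 (fun p => p.1) false).Pairwise
        (fun a b => a.1 < b.1) := by
      have := hle.and hne
      exact this.imp (fun h => lt_of_le_of_ne h.1 h.2)
    exact (PySem.List.sorted_eq_of_perm_of_pairwise_lt d2 _ (fun p => p.1) hp1 hlt).symm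

-- With well-formed dicts, A's two loops succeed iff the stripped dicts are Python-equal
theorem loops_iff_strip {f1 f2 : List (String × Int)}
    (hn1 : (f1.map (·.1)).Nodup) :
    ((f1.all (fun p => p.1 == "H" || pvLookup f2 p.1 == some p.2)) &&
     (f2.all (fun p => p.1 == "H" || (pvLookup f1 p.1).isSome)))
    = pvDictEq (f1.filter (fun p => !(p.1 == "H"))) (f2.filter (fun p => !(p.1 == "H"))) := by
  unfold pvDictEq
  apply Bool.eq_iff_iff.mpr
  simp only [Bool.and_eq_true, List.all_eq_true]
  constructor
  · rintro ⟨h1, h2⟩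
    constructor
    · intro p hp
      have hmem := List.mem_of_mem_filter hp
      have hH : p.1 ≠ "H" := by have := List.of_mem_filter hp; simpa using this
      rw [pvLookup_filter _ _ hH, pvLookup_filter _ _ hH]
      have := h1 p hmem
      simp [hH] at this
      simp [this, pvLookup_mem hn1 hmem]
    · intro p hp
      have hmem := List.mem_of_mem_filter hp
      have hH : p.1 ≠ "H" := by have := List.of_mem_filter hp; simpa using this
      rw [pvLookup_filter _ _ hH]
      have := h2 p hmem
      simpa [hH] using this
  · rintro ⟨h1, h2⟩
    constructor
    · intro p hp
      by_cases hH : p.1 = "H"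
      · simp [hH]
      · have hp' : p ∈ f1.filter (fun p => !(p.1 == "H")) :=
          List.mem_filter.mpr ⟨hp, by simpa using hH⟩
        have := h1 p hp'
        rw [pvLookup_filter _ _ hH, pvLookup_filter _ _ hH] at this
        simp [pvLookup_mem hn1 hp] at this
        simp [this]
    · intro p hp
      by_cases hH : p.1 = "H"
      · simp [hH]
      · have hp' : p ∈ f2.filter (fun p => !(p.1 == "H")) :=
          List.mem_filter.mpr ⟨hp, by simpa using hH⟩
        have := h2 p hp'
        rw [pvLookup_filter _ _ hH] at this
        simp [this]

-- ===== VERDICT (by name: the statement is the Claim_ definition above) =====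
theorem formulae_equal_spec : Claim_equal_formulae_equal := by
  intro f1 f2 H_err _ hpre
  unfold Spec_formulae_equal formulae_equal formulae_equal_alt
  obtain ⟨hn1, hn2⟩ := hpre
  by_cases hE : pvDictEq f1 f2 = true
  · simp [hE]
  · simp only [hE, if_false, Bool.false_eq_true]
    have hkey : ((PySem.List.sorted (f1.filter (fun p => !(p.1 == "H"))) (fun p => p.1) false
        == PySem.List.sorted (f2.filter (fun p => !(p.1 == "H"))) (fun p => p.1) false) : Bool)
        = pvDictEq (f1.filter (fun p => !(p.1 == "H"))) (f2.filter (fun p => !(p.1 == "H"))) := by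
      apply Bool.eq_iff_iff.mpr
      rw [beq_iff_eq,
        sortedEq_iff_perm (nodup_keys_filter hn1) (nodup_keys_filter hn2),
        dictEq_iff_perm (nodup_keys_filter hn1) (nodup_keys_filter hn2)]
    rw [hkey, ← loops_iff_strip hn1]
    by_cases hok : |(pvLookup f1 "H").getD 0 - (pvLookup f2 "H").getD 0| ≤ H_err <;>
      cases h1 : f1.all (fun p => p.1 == "H" || pvLookup f2 p.1 == some p.2) <;>
        cases h2 : f2.all (fun p => p.1 == "H" || (pvLookup f1 p.1).isSome) <;>
          simp [hok]
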